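-- pv_equiv track=rewrite | github.com/Imwisagist/Leetcode_algorithm_tasks | yandex_algotraining_homework/2.Lecture/E.Чемпионат по метанию коровьих лепешек.py | solve
-- ===== SOURCE A (Python) =====
-- def solve(throws):
--     winner_throw = throws[0]; winner_was_before = True
--     vasya_best_throw = None; vasya_best_placement = 1
--
--     for i in range(1, len(throws) - 1):
--         throw = throws[i]
--
--         if throw > winner_throw:
--             winner_throw = throw; winner_was_before = True
--             vasya_best_throw = None
--         else:
--             if winner_was_before:
--                 if throw % 10 == 5 and throws[i + 1] < throw:
--                     if not vasya_best_throw or vasya_best_throw < throw: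
--                         vasya_best_throw = throw
--
--     if not vasya_best_throw: return 0
--
--     for throw in throws:
--         if throw > vasya_best_throw: vasya_best_placement += 1
--
--     return vasya_best_placement
-- ===== SOURCE B (Python) =====
-- def solve(throws):
--     n = len(throws)
--     # pass 1: index of the last strict prefix-maximum among positions 1..n-2 (0 if none)
--     cur = throws[0] if throws else 0
--     last_max_idx = 0
--     for i in range(1, n - 1):
--         if throws[i] > cur:
--             cur = throws[i]
--             last_max_idx = i
--     # pass 2: best qualifying throw strictly after the last prefix-maximum
--     best = None
--     for j in range(last_max_idx + 1, n - 1):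
--         t = throws[j]
--         if t % 10 == 5 and throws[j + 1] < t and (best is None or t > best):
--             best = t
--     if best is None:
--         return 0
--     return 1 + sum(1 for t in throws if t > best)
-- ===== Notes on version B (the rewrite author's own statement) =====
-- stated objective: simpler
-- what changed: Replaced A's single entangled stateful loop (running max + reset-on-new-max best tracker with truthiness checks) by two plain passes: first find the index of the last strict prefix-maximum, then take the best qualifying throw strictly after it; also dropped A's dead winner_was_before flag.
-- outside the precondition, e.g. on solve([]): A raises IndexError, B returns 0
import Mathlib
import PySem

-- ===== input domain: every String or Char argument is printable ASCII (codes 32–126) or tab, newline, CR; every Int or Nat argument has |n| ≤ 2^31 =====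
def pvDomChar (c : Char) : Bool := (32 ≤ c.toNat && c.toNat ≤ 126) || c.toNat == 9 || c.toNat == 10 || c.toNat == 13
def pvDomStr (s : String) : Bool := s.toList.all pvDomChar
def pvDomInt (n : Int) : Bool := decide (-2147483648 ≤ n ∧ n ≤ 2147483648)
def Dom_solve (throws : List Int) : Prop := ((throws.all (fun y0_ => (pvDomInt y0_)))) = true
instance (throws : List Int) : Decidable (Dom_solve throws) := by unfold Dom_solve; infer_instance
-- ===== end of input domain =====

-- B rewrites A's single entangled stateful loop as two plain passes (last prefix-max index, then best
-- qualifying throw after it); objective: simpler. Return-value equivalence on nonempty lists (A raises on []).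

-- ===== PORT A =====
-- one loop iteration of A's main for-loop; state = (winner_throw, winner_was_before, vasya_best_throw)
def stepA (throws : List Int) (st : Int × Bool × Option Int) (i : Int) : Int × Bool × Option Int :=
  let throw := PySem.List.pyGetD throws i 0
  if throw > st.1 then (throw, true, none)
  else if st.2.1 then
    if PySem.Int.mod throw 10 = 5 ∧ PySem.List.pyGetD throws (i + 1) 0 < throw then
      -- Python: if not vasya_best_throw or vasya_best_throw < throw  (truthiness: None or 0 is falsy)
      match st.2.2 with
      | none => (st.1, st.2.1, some throw)
      | some b => if b = 0 ∨ b < throw then (st.1, st.2.1, some throw) else st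
    else st
  else st

def solve (throws : List Int) : Int :=
  let winner0 := PySem.List.pyGetD throws 0 0   -- throws[0]; [] raises IndexError, excluded by Pre_
  let s := (PySem.List.pyRange 1 ((throws.length : Int) - 1) 1).foldl (stepA throws) (winner0, true, none)
  match s.2.2 with
  | none => 0
  | some b =>
      if b = 0 then 0   -- Python truthiness: 'if not vasya_best_throw: return 0'
      else throws.foldl (fun acc t => if t > b then acc + 1 else acc) 1

-- ===== PORT B =====
-- pass 1 step: running prefix max and index of its last strict increase
def stepMax (throws : List Int) (st : Int × Int) (i : Int) : Int × Int :=
  if PySem.List.pyGetD throws i 0 > st.1 then (PySem.List.pyGetD throws i 0, i) else st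

-- pass 2 step: best qualifying throw
def stepBest (throws : List Int) (b : Option Int) (j : Int) : Option Int :=
  let t := PySem.List.pyGetD throws j 0
  if PySem.Int.mod t 10 = 5 ∧ PySem.List.pyGetD throws (j + 1) 0 < t then
    match b with
    | none => some t
    | some x => if t > x then some t else b
  else b

def solve_alt (throws : List Int) : Int :=
  let n : Int := throws.length
  let cur0 := if throws = [] then 0 else PySem.List.pyGetD throws 0 0
  let p1 := (PySem.List.pyRange 1 (n - 1) 1).foldl (stepMax throws) (cur0, 0)
  let best := (PySem.List.pyRange (p1.2 + 1) (n - 1) 1).foldl (stepBest throws) none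
  match best with
  | none => 0
  | some b => 1 + (throws.map (fun t => if t > b then (1 : Int) else 0)).sum

-- ===== PRECONDITION & SPEC =====
-- Pre_ excludes only the empty list, on which A raises IndexError (throws[0]).
def Pre_solve (throws : List Int) : Prop := throws ≠ []
instance (throws : List Int) : Decidable (Pre_solve throws) := by unfold Pre_solve; infer_instance
def pvWitness_solve : List Int := [10, 5, 3, 7]

def Spec_solve (throws : List Int) (out : Int) : Prop := out = solve_alt throws
instance (throws : List Int) (out : Int) : Decidable (Spec_solve throws out) := by unfold Spec_solve; infer_instance

-- ===== CLAIM (what is proved, stated in full; the proofs are below) =====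
def Claim_equal_solve : Prop := ∀ (throws : List Int), Dom_solve throws → Pre_solve throws → Spec_solve throws (solve throws)

-- ===== LEMMAS AND PROOFS =====

-- the index component of pass 1 is the initial index or an element of the processed list
lemma foldMax_idx (throws : List Int) (L : List Int) (w j0 : Int) :
    (L.foldl (stepMax throws) (w, j0)).2 = j0 ∨ (L.foldl (stepMax throws) (w, j0)).2 ∈ L := by
  induction L generalizing w j0 with
  | nil => exact Or.inl rfl
  | cons i L ih =>
    simp only [List.foldl_cons, stepMax]
    split
    · rcases ih (PySem.List.pyGetD throws i 0) i with h | h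
      · exact Or.inr (by simp [h])
      · exact Or.inr (List.mem_cons_of_mem _ h)
    · rcases ih w j0 with h | h
      · exact Or.inl h
      · exact Or.inr (List.mem_cons_of_mem _ h)

-- every value stored by pass 2 ends in 5 (mod 10), in particular is nonzero
lemma foldBest_mod (throws : List Int) (L : List Int) (v : Option Int)
    (hv : ∀ b, v = some b → PySem.Int.mod b 10 = 5) :
    ∀ b, L.foldl (stepBest throws) v = some b → PySem.Int.mod b 10 = 5 := by
  induction L generalizing v with
  | nil => exact hv
  | cons j L ih =>
    intro b hb
    refine ih _ ?_ b hb
    intro c hc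
    rcases v with _ | x
    · simp only [stepBest] at hc
      split at hc
      · rename_i h5; cases hc; exact h5.1
      · exact absurd hc (by simp)
    · have hx5 := hv x rfl
      simp only [stepBest] at hc
      split at hc
      · rename_i h5
        split at hc
        · cases hc; exact h5.1
        · cases hc; exact hx5
      · cases hc; exact hx5

lemma stepA_eq_stepBest (throws : List Int) (w : Int) (v : Option Int) (i : Int)
    (ht : ¬ PySem.List.pyGetD throws i 0 > w)
    (hv : ∀ b, v = some b → PySem.Int.mod b 10 = 5) :
    stepA throws (w, true, v) i = (w, true, stepBest throws v i) := by
  rcases v with _ | x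
  · simp only [stepA, stepBest]
    rw [if_neg ht]
    simp only [if_true]
    split <;> rfl
  · have hx5 : PySem.Int.mod x 10 = 5 := hv x rfl
    have hx0 : x ≠ 0 := by rintro rfl; rw [show PySem.Int.mod (0:Int) 10 = 0 from by decide] at hx5; omega
    simp only [stepA, stepBest]
    rw [if_neg ht]
    simp only [if_true]
    split
    · by_cases h : x < PySem.List.pyGetD throws i 0
      · rw [if_pos (Or.inr h), if_pos h]
      · rw [if_neg (by rintro (rfl | h'); exacts [hx0 rfl, h h']), if_neg h]
    · rfl

-- MAIN INVARIANT: on a strictly increasing index list whose elements all exceed j0, A's loop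
-- computes pass 1's max, and its best equals pass 2 run on the indices after the last max index.
lemma main_inv (throws : List Int) (L : List Int) (w j0 : Int) (v : Option Int)
    (hinc : L.Pairwise (· < ·)) (hgt : ∀ i ∈ L, j0 < i)
    (hv : ∀ b, v = some b → PySem.Int.mod b 10 = 5) :
    L.foldl (stepA throws) (w, true, v) =
      ((L.foldl (stepMax throws) (w, j0)).1, true,
        (L.filter (fun i => decide ((L.foldl (stepMax throws) (w, j0)).2 < i))).foldl (stepBest throws)
          (if (L.foldl (stepMax throws) (w, j0)).2 = j0 then v else none)) := by
  induction L generalizing w j0 v with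
  | nil => simp
  | cons i L ih =>
    have hiL : ∀ x ∈ L, i < x := fun x hx => (List.pairwise_cons.mp hinc).1 x hx
    have hLp : L.Pairwise (· < ·) := (List.pairwise_cons.mp hinc).2
    have hj0i : j0 < i := hgt i (by simp)
    simp only [List.foldl_cons]
    by_cases ht : PySem.List.pyGetD throws i 0 > w
    · rw [show stepA throws (w, true, v) i = (PySem.List.pyGetD throws i 0, true, none) by
            simp [stepA, ht]]
      simp only [show stepMax throws (w, j0) i = (PySem.List.pyGetD throws i 0, i) from by
            simp [stepMax, ht]]
      rw [ih _ _ _ hLp hiL (by simp)]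
      have hj := foldMax_idx throws L (PySem.List.pyGetD throws i 0) i
      have hij : ¬ (L.foldl (stepMax throws) (PySem.List.pyGetD throws i 0, i)).2 < i := by
        rcases hj with h | h
        · omega
        · have := hiL _ h; omega
      have hjj0 : ¬ (L.foldl (stepMax throws) (PySem.List.pyGetD throws i 0, i)).2 = j0 := by
        rcases hj with h | h
        · omega
        · have := hgt _ (List.mem_cons_of_mem _ h); omega
      rw [List.filter_cons_of_neg (by simpa using hij), if_neg hjj0]
      simp
    · have hv' : ∀ b, stepBest throws v i = some b → PySem.Int.mod b 10 = 5 := by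
        have := foldBest_mod throws [i] v hv
        simpa using this
      rw [stepA_eq_stepBest throws w v i ht hv]
      simp only [show stepMax throws (w, j0) i = (w, j0) from by simp [stepMax, ht]]
      rw [ih _ _ _ hLp (fun x hx => hgt x (List.mem_cons_of_mem _ hx)) hv']
      have hj := foldMax_idx throws L w j0
      by_cases hjj : (L.foldl (stepMax throws) (w, j0)).2 = j0
      · rw [List.filter_cons_of_pos (by simp; omega)]
        rw [if_pos hjj, if_pos hjj, List.foldl_cons]
      · have hji : ¬ (L.foldl (stepMax throws) (w, j0)).2 < i := by
          rcases hj with h | h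
          · exact absurd h hjj
          · have := hiL _ h; omega
        rw [List.filter_cons_of_neg (by simpa using hji), if_neg hjj, if_neg hjj]


-- filter of a consecutive range by (m < ·)
lemma filter_pyRange_ge (m a b : Int) (h : m < a) :
    (PySem.List.pyRange a b 1).filter (fun i => decide (m < i)) = PySem.List.pyRange a b 1 := by
  apply List.filter_eq_self.mpr
  intro x hx
  have := (PySem.List.mem_pyRange_one).mp hx
  simp; omega

lemma filter_pyRange_gt (m : Int) (a b : Int) (h : a ≤ m + 1) :
    (PySem.List.pyRange a b 1).filter (fun i => decide (m < i)) = PySem.List.pyRange (m + 1) b 1 := by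
  have H : ∀ k : Nat, ∀ a : Int, (b - a).toNat = k → a ≤ m + 1 →
      (PySem.List.pyRange a b 1).filter (fun i => decide (m < i)) = PySem.List.pyRange (m + 1) b 1 := by
    intro k
    induction k with
    | zero =>
      intro a hk ha
      rw [PySem.List.pyRange_one_eq_nil (by omega), PySem.List.pyRange_one_eq_nil (by omega)]
      rfl
    | succ k ih =>
      intro a hk ha
      have hab : a < b := by omega
      by_cases ham : a ≤ m
      · rw [PySem.List.pyRange_one_cons hab, List.filter_cons_of_neg (by simp; omega)]
        exact ih (a + 1) (by omega) (by omega)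
      · have : a = m + 1 := by omega
        subst this
        exact filter_pyRange_ge m (m + 1) b (by omega)
  exact H (b - a).toNat a rfl h


-- A's final counting loop equals B's 1 + sum of indicator map
lemma count_loop (b : Int) (xs : List Int) (c : Int) :
    xs.foldl (fun acc t => if t > b then acc + 1 else acc) c
      = c + (xs.map (fun t => if t > b then (1 : Int) else 0)).sum := by
  induction xs generalizing c with
  | nil => simp
  | cons x xs ih =>
    by_cases h : x > b
    · simp [h, ih]; ring
    · simp [h, ih]

-- ===== VERDICT (by name: the statement is the Claim_ definition above) =====
theorem solve_spec : Claim_equal_solve := by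
  intro throws _ hpre
  unfold Spec_solve
  simp only [solve, solve_alt, if_neg hpre]
  rw [main_inv throws _ (PySem.List.pyGetD throws 0 0) 0 none
        (PySem.List.pairwise_lt_pyRange_one _ _)
        (fun i hi => by have := PySem.List.mem_pyRange_one.mp hi; omega)
        (by simp)]
  have hjmem := foldMax_idx throws (PySem.List.pyRange 1 ((throws.length : Int) - 1) 1)
      (PySem.List.pyGetD throws 0 0) 0
  have hj0 : 0 ≤ ((PySem.List.pyRange 1 ((throws.length : Int) - 1) 1).foldl (stepMax throws)
      (PySem.List.pyGetD throws 0 0, 0)).2 := by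
    rcases hjmem with h | h
    · omega
    · have := PySem.List.mem_pyRange_one.mp h; omega
  rw [filter_pyRange_gt _ 1 _ (by omega), ite_self]
  cases hbest : (PySem.List.pyRange
      (((PySem.List.pyRange 1 ((throws.length : Int) - 1) 1).foldl (stepMax throws)
        (PySem.List.pyGetD throws 0 0, 0)).2 + 1) ((throws.length : Int) - 1) 1).foldl
      (stepBest throws) none with
  | none => rfl
  | some b =>
    have hb5 := foldBest_mod throws _ none (by simp) b hbest
    have hb0 : b ≠ 0 := by
      rintro rfl
      rw [show PySem.Int.mod (0 : Int) 10 = 0 from by decide] at hb5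
      omega
    simp only [if_neg hb0]
    rw [count_loop b throws 1]
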